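-- pv_equiv track=rewrite | github.com/ChFlick/AdventOfCode | 2017/24/electromagneticMoat.py | maxBridgeConnections
-- ===== SOURCE A (Python) =====
-- from functools import reduce
--
-- def maxBridgeConnections(currentComponents, freeElement, bridges):
--     fittingBridges = [x for x in bridges if x.count(freeElement) > 0]
--     if len(fittingBridges) == 0:
--         return calcVal(currentComponents)
--
--     maxVal = 0
--     for bridge in fittingBridges:
--         index = bridges.index(bridge)
--         bridgesWithoutCurrent = bridges[:index] + bridges[index + 1:]
--         nextVal = maxBridgeConnections(currentComponents + [bridge], bridge[1] if bridge[0] == freeElement else bridge[0], bridgesWithoutCurrent)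
--         maxVal = max(maxVal, nextVal)
--
--     return maxVal
--
-- def calcVal(bridges):
--     return reduce(lambda x,y: x + sum(y), bridges, 0)
-- ===== SOURCE B (Python) =====
-- def maxBridgeConnections(currentComponents, freeElement, bridges):
--     fitting = [x for x in bridges if freeElement in x]
--     if not fitting:
--         return sum(a + b for a, b in currentComponents)
--     best = 0
--     stack = [(currentComponents, freeElement, bridges)]
--     while stack:
--         cc, free, brs = stack.pop()
--         fit = [x for x in brs if free in x]
--         if not fit:
--             best = max(best, sum(a + b for a, b in cc))
--         else:
--             for bridge in fit:
--                 i = brs.index(bridge)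
--                 stack.append((cc + [bridge],
--                               bridge[1] if bridge[0] == free else bridge[0],
--                               brs[:i] + brs[i + 1:]))
--     return best
-- ===== Notes on version B (the rewrite author's own statement) =====
-- stated objective: alternative
-- what changed: The recursive exhaustive search is replaced by an iterative depth-first search over an explicit stack of (components, free element, remaining bridges) frames accumulating the best leaf value, with a top-level short-circuit when nothing fits; leaf values are computed by a generator sum instead of reduce.
import Mathlib
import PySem

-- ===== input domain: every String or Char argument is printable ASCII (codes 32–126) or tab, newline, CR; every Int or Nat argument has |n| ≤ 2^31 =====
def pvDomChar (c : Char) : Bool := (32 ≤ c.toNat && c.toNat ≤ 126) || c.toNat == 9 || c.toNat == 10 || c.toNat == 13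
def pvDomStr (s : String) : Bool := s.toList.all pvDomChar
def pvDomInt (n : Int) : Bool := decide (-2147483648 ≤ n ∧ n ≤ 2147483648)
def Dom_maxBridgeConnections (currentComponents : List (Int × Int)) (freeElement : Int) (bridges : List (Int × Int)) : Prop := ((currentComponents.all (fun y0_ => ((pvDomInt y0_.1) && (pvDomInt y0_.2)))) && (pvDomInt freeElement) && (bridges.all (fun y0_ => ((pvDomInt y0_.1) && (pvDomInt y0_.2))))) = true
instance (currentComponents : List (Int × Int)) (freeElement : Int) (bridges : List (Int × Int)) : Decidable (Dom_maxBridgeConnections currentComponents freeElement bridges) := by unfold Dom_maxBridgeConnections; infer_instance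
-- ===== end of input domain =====

-- B rewrites A's recursive exhaustive search as an iterative explicit-stack DFS (objective: alternative decomposition, same cost).

-- removing the first occurrence of a member (bridges[:i] ++ bridges[i+1:], i = bridges.index(bridge))
-- shortens the list by one; cited by both ports' termination proofs
theorem pvRemoveLen {bridge : Int × Int} {brs : List (Int × Int)} (h : bridge ∈ brs) :
    (PySem.List.slice brs none (some (((PySem.List.index? brs bridge).getD 0 : Nat) : Int)) ++
      PySem.List.slice brs (some ((((PySem.List.index? brs bridge).getD 0 : Nat) : Int) + 1)) none).length
      = brs.length - 1 := by
  obtain ⟨i, hi⟩ := Option.isSome_iff_exists.mp ((PySem.List.index?_isSome_iff _ _).mpr h)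
  obtain ⟨hk, -, -⟩ := PySem.List.getElem_of_index?_eq_some hi
  rw [hi]
  simp only [Option.getD_some]
  have h1 : ((i : Int) + 1) = ((i + 1 : Nat) : Int) := by push_cast; ring
  rw [PySem.List.slice_to_natCast, h1, PySem.List.slice_from_natCast]
  simp only [List.length_append, List.length_take, List.length_drop]
  omega

-- ===== PORT A =====
-- A-side helper: calcVal(bridges) = reduce(lambda x,y: x + sum(y), bridges, 0); sum of a pair is fst+snd
def calcValA (bridges : List (Int × Int)) : Int :=
  bridges.foldl (fun x y => x + (y.1 + y.2)) 0

-- x.count(freeElement) > 0 on a pair = count of freeElement among its two elements is positive;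
-- bridges.index(bridge) = PySem.List.index? (always some here since bridge ∈ bridges, so getD 0 is never the default)
def maxBridgeConnections (currentComponents : List (Int × Int)) (freeElement : Int) (bridges : List (Int × Int)) : Int :=
  let fittingBridges := bridges.filter (fun x => decide (0 < PySem.List.count [x.1, x.2] freeElement))
  if fittingBridges.length = 0 then calcValA currentComponents
  else
    fittingBridges.attach.foldl
      (fun maxVal bh =>
        let bridge := bh.1
        let index : Nat := (PySem.List.index? bridges bridge).getD 0
        let bridgesWithoutCurrent :=
          PySem.List.slice bridges none (some (index : Int)) ++
            PySem.List.slice bridges (some ((index : Int) + 1)) none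
        max maxVal (maxBridgeConnections (currentComponents ++ [bridge])
          (if bridge.1 = freeElement then bridge.2 else bridge.1) bridgesWithoutCurrent))
      0
termination_by bridges.length
decreasing_by
  have hmem : (bh : Int × Int) ∈ bridges := by
    have h2 := bh.2
    simp [fittingBridges] at h2
    exact h2.1
  have hlen := pvRemoveLen hmem
  rw [hlen]
  cases bridges with
  | nil => simp at hmem
  | cons a l => simp

-- ===== PORT B =====
-- B-side helper: sum(a + b for a, b in cc)
def calcValB (cc : List (Int × Int)) : Int :=
  (cc.map (fun p => p.1 + p.2)).sum

-- B-side helper: the child frame pushed for one fitting bridge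
def mkChildB (cc : List (Int × Int)) (free : Int) (brs : List (Int × Int)) (bridge : Int × Int) :
    List (Int × Int) × Int × List (Int × Int) :=
  let i : Nat := (PySem.List.index? brs bridge).getD 0
  (cc ++ [bridge],
   if bridge.1 = free then bridge.2 else bridge.1,
   PySem.List.slice brs none (some (i : Int)) ++ PySem.List.slice brs (some ((i : Int) + 1)) none)

-- the while loop; the Lean list holds the Python stack reversed (head = last pushed = next popped),
-- so the for-loop's sequence of appends prepends the children list reversed
def bLoop (stack : List (List (Int × Int) × Int × List (Int × Int))) (best : Int) : Int :=
  match stack with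
  | [] => best
  | (cc, free, brs) :: rest =>
    let fit := brs.filter (fun x => x.1 == free || x.2 == free)
    if fit.isEmpty then bLoop rest (max best (calcValB cc))
    else bLoop (((fit.map (mkChildB cc free brs)).reverse) ++ rest) best
termination_by (stack.map (fun fr => (fr.2.2.length + 1).factorial)).sum
decreasing_by
  · simp only [List.map_cons, List.sum_cons]
    have : 0 < (brs.length + 1).factorial := Nat.factorial_pos _
    omega
  · have hfit : fit ≠ [] := by
      intro h; exact ‹¬ fit.isEmpty = true› (by simp [h])
    obtain ⟨b0, hb0⟩ := List.exists_mem_of_ne_nil fit hfit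
    have hb0' : b0 ∈ brs := by simp [fit] at hb0; exact hb0.1
    have hn : 1 ≤ brs.length := by cases brs with
      | nil => simp at hb0'
      | cons a l => simp
    have hconst : ∀ x ∈ (fit.map (mkChildB cc free brs)).map (fun fr => (fr.2.2.length + 1).factorial), x = brs.length.factorial := by
      intro x hx
      simp only [List.map_map, List.mem_map, Function.comp] at hx
      obtain ⟨b, hb, rfl⟩ := hx
      have hbm : b ∈ brs := by simp [fit] at hb; exact hb.1
      have hrl := pvRemoveLen hbm
      simp only [mkChildB, hrl]
      congr 1
      omega
    have hsum := List.sum_eq_card_nsmul _ _ hconst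
    simp only [List.length_map, smul_eq_mul, List.map_map] at hsum
    have hk : fit.length ≤ brs.length := by
      simp only [fit, List.length_unattach]
      exact le_trans (List.length_filter_le _ _) (by simp)
    have hfact : fit.length * brs.length.factorial < (brs.length + 1).factorial := by
      have hpos := Nat.factorial_pos brs.length
      calc fit.length * brs.length.factorial ≤ brs.length * brs.length.factorial :=
            Nat.mul_le_mul_right _ hk
        _ < (brs.length + 1) * brs.length.factorial := (Nat.mul_lt_mul_right hpos).mpr (by omega)
        _ = (brs.length + 1).factorial := rfl
    simp only [List.map_append, List.sum_append, List.map_reverse, List.sum_reverse,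
      List.map_cons, List.sum_cons, List.map_map]
    simp only [fit] at hsum hfact
    omega

-- top level: if nothing fits the free element return the value of the chain built so far,
-- otherwise run the DFS from a singleton stack with best = 0
def maxBridgeConnections_alt (currentComponents : List (Int × Int)) (freeElement : Int) (bridges : List (Int × Int)) : Int :=
  let fitting := bridges.filter (fun x => x.1 == freeElement || x.2 == freeElement)
  if fitting.isEmpty then calcValB currentComponents
  else bLoop [(currentComponents, freeElement, bridges)] 0

-- ===== PRECONDITION & SPEC =====
def Spec_maxBridgeConnections (currentComponents : List (Int × Int)) (freeElement : Int) (bridges : List (Int × Int)) (out : Int) : Prop := out = maxBridgeConnections_alt currentComponents freeElement bridges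
instance (currentComponents : List (Int × Int)) (freeElement : Int) (bridges : List (Int × Int)) (out : Int) : Decidable (Spec_maxBridgeConnections currentComponents freeElement bridges out) := by unfold Spec_maxBridgeConnections; infer_instance

-- ===== CLAIM (what is proved, stated in full; the proofs are below) =====
def Claim_equal_maxBridgeConnections : Prop := ∀ (currentComponents : List (Int × Int)) (freeElement : Int) (bridges : List (Int × Int)), Dom_maxBridgeConnections currentComponents freeElement bridges → Spec_maxBridgeConnections currentComponents freeElement bridges (maxBridgeConnections currentComponents freeElement bridges)

-- ===== LEMMAS AND PROOFS =====

theorem calcVal_eq (cc : List (Int × Int)) : calcValA cc = calcValB cc := by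
  unfold calcValA calcValB
  induction cc using List.reverseRecOn with
  | nil => simp
  | append_singleton l p ih => simp [ih]

-- the two fitting-bridge predicates agree
theorem filter_eq (free : Int) (brs : List (Int × Int)) :
    brs.filter (fun x => decide (0 < PySem.List.count [x.1, x.2] free)) =
      brs.filter (fun x => x.1 == free || x.2 == free) := by
  apply List.filter_congr
  intro x _
  simp [PySem.List.count, List.count_cons]
  by_cases h1 : x.1 = free <;> by_cases h2 : x.2 = free <;> simp [h1, h2]

-- a fold of maxes commutes with max on the initial value
theorem foldl_max_init {α : Type} (v : α → Int) (l : List α) :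
    ∀ x y : Int, l.foldl (fun b c => max b (v c)) (max x y) =
      max (l.foldl (fun b c => max b (v c)) x) y := by
  induction l with
  | nil => intro x y; rfl
  | cons c l ih =>
    intro x y
    simp only [List.foldl_cons]
    rw [max_right_comm x y (v c), ih]

-- the initial value is a lower bound of a fold of maxes
theorem le_foldl_max {α : Type} (v : α → Int) (l : List α) :
    ∀ x : Int, x ≤ l.foldl (fun b c => max b (v c)) x := by
  induction l with
  | nil => intro x; exact le_refl x
  | cons c l ih => intro x; exact le_trans (le_max_left x (v c)) (ih _)

-- a fold of maxes is invariant under reversal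
theorem foldl_max_reverse {α : Type} (v : α → Int) (l : List α) :
    ∀ x : Int, l.reverse.foldl (fun b c => max b (v c)) x =
      l.foldl (fun b c => max b (v c)) x := by
  induction l with
  | nil => intro x; rfl
  | cons c l ih =>
    intro x
    simp only [List.reverse_cons, List.foldl_append, List.foldl_cons, List.foldl_nil, ih,
      List.foldl_cons]
    rw [← foldl_max_init]

-- A's value of a frame, as folded over by the loop invariant
def aVal (fr : List (Int × Int) × Int × List (Int × Int)) : Int :=
  maxBridgeConnections fr.1 fr.2.1 fr.2.2

-- the WF translation's attached filter is the plain filter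
theorem fit_unattach (free : Int) (brs : List (Int × Int)) :
    (List.filter (fun x => match x with | ⟨x, _⟩ => x.1 == free || x.2 == free) brs.attach).unattach
      = brs.filter (fun x => x.1 == free || x.2 == free) := by
  rw [List.unattach_filter (hf := fun x h => rfl), List.unattach_attach]
  apply List.filter_congr; intro x _; cases x.1 == free <;> rfl

-- loop invariant: with a nonnegative accumulator, the DFS loop folds A's value over the stack
theorem bLoop_spec (stack : List (List (Int × Int) × Int × List (Int × Int))) (best : Int) :
    0 ≤ best → bLoop stack best = stack.foldl (fun b fr => max b (aVal fr)) best := by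
  fun_induction bLoop stack best with
  | case1 best => intro _; rfl
  | case2 best cc free brs rest fit hempty ih =>
    intro hb
    simp only [fit] at hempty
    rw [fit_unattach free brs] at hempty
    simp only [hempty, if_true]
    rw [ih (le_trans hb (le_max_left _ _)), List.foldl_cons]
    have hleaf : aVal (cc, free, brs) = calcValA cc := by
      unfold aVal
      rw [maxBridgeConnections]
      simp only [filter_eq free brs]
      rw [List.isEmpty_iff.mp hempty]
      simp
    rw [hleaf, calcVal_eq]
  | case3 best cc free brs rest fit hempty ih =>
    intro hb
    simp only [fit] at hempty ih
    rw [fit_unattach free brs] at hempty ih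
    simp only [hempty, Bool.false_eq_true, if_false]
    rw [ih hb, List.foldl_append, List.foldl_cons]
    congr 1
    rw [foldl_max_reverse aVal, List.foldl_map]
    have hA : aVal (cc, free, brs) =
        (brs.filter (fun x => x.1 == free || x.2 == free)).foldl
          (fun b bridge => max b (aVal (mkChildB cc free brs bridge))) 0 := by
      unfold aVal
      rw [maxBridgeConnections]
      rw [filter_eq free brs]
      rw [if_neg (by simpa [List.isEmpty_iff, List.length_eq_zero_iff] using hempty)]
      rw [List.foldl_attach (f := fun maxVal bridge => max maxVal
        (maxBridgeConnections (cc ++ [bridge])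
          (if bridge.1 = free then bridge.2 else bridge.1)
          (PySem.List.slice brs none (some (((PySem.List.index? brs bridge).getD 0 : Nat) : Int)) ++
            PySem.List.slice brs (some ((((PySem.List.index? brs bridge).getD 0 : Nat) : Int) + 1)) none)))]
      rfl
    rw [hA]
    conv_lhs => rw [show best = max 0 best from (max_eq_right hb).symm]
    rw [foldl_max_init]
    exact max_comm _ _

-- ===== VERDICT (by name: the statement is the Claim_ definition above) =====
theorem maxBridgeConnections_spec : Claim_equal_maxBridgeConnections := by
  intro cc free brs _
  unfold Spec_maxBridgeConnections maxBridgeConnections_alt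
  by_cases h : (brs.filter (fun x => x.1 == free || x.2 == free)).isEmpty
  · rw [if_pos h]
    rw [maxBridgeConnections, filter_eq free brs, List.isEmpty_iff.mp h]
    simp [calcVal_eq]
  · rw [if_neg h]
    rw [bLoop_spec _ 0 (le_refl 0)]
    simp only [List.foldl_cons, List.foldl_nil]
    have hApos : 0 ≤ aVal (cc, free, brs) := by
      unfold aVal
      rw [maxBridgeConnections, filter_eq free brs]
      rw [if_neg (by simpa [List.isEmpty_iff, List.length_eq_zero_iff] using h)]
      exact le_foldl_max _ _ 0
    simp only [aVal] at hApos ⊢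
    exact (max_eq_right hApos).symm
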